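-- pv_equiv track=rewrite | github.com/IorenzoLF/Le_Refuge | Le_refuge/arc_agi_refuge/resoudre_bloc_simple_007bbfb7.py | appliquer_bloc_simple
-- ===== SOURCE A (Python) =====
-- def appliquer_bloc_simple(input_3x3):
--     """Appliquer la logique simple: 0 = vide, couleur = zone remplie de cette couleur"""
--     solution = [[0 for _ in range(9)] for _ in range(9)]
--
--     for i in range(3):
--         for j in range(3):
--             valeur = input_3x3[i][j]
--             start_i, start_j = i * 3, j * 3
--
--             if valeur == 0:
--                 # Zone vide
--                 pattern = [0, 0, 0, 0, 0, 0, 0, 0, 0]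
--             else:
--                 # Zone remplie de la couleur
--                 pattern = [valeur, valeur, valeur, valeur, valeur, valeur, valeur, valeur, valeur]
--
--             # Appliquer le pattern
--             for x in range(3):
--                 for y in range(3):
--                     solution[start_i + x][start_j + y] = pattern[x * 3 + y]
--
--     return solution
-- ===== SOURCE B (Python) =====
-- def appliquer_bloc_simple(input_3x3):
--     """Appliquer la logique simple: 0 = vide, couleur = zone remplie de cette couleur"""
--     return [[input_3x3[r // 3][c // 3] for c in range(9)] for r in range(9)]
-- ===== Notes on version B (the rewrite author's own statement) =====
-- stated objective: simpler
-- what changed: Replaces the zero-grid initialisation plus per-block pattern fill (with a redundant 0/non-0 branch) by a single nested comprehension over the 9x9 output coordinates that reads the source cell by integer division r//3, c//3.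
import Mathlib
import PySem

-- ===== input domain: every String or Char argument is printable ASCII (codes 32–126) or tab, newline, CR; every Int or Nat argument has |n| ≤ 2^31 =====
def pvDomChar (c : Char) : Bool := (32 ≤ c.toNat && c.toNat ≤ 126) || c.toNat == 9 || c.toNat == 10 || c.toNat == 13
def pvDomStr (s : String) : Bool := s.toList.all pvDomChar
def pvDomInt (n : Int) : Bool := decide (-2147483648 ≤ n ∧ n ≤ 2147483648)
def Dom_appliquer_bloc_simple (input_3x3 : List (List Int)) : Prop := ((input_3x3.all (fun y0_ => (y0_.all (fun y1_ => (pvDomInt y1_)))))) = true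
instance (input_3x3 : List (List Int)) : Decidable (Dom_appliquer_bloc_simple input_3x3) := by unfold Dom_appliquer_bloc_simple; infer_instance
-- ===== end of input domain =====

-- B replaces A's zero-init plus per-block pattern fill (with a redundant 0/non-0 branch)
-- by one nested comprehension over the 9x9 output coordinates indexing the source by //3 (objective: simpler).

-- ===== PORT A =====
-- Out-of-range reads (impossible under Pre_) use getD defaults; inside Pre_ every access is in range, exactly as Python.
def appliquer_bloc_simple (input_3x3 : List (List Int)) : List (List Int) :=
  let solution : List (List Int) := List.replicate 9 (List.replicate 9 0)
  (List.range 3).foldl (fun sol i =>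
    (List.range 3).foldl (fun sol j =>
      let valeur := (input_3x3.getD i []).getD j 0
      let start_i := i * 3
      let start_j := j * 3
      let pattern : List Int :=
        if valeur == 0 then [0, 0, 0, 0, 0, 0, 0, 0, 0]
        else [valeur, valeur, valeur, valeur, valeur, valeur, valeur, valeur, valeur]
      (List.range 3).foldl (fun sol x =>
        (List.range 3).foldl (fun sol y =>
          sol.modify (start_i + x) (fun row => row.set (start_j + y) (pattern.getD (x * 3 + y) 0)))
          sol) sol) sol) solution

-- ===== PORT B =====
def appliquer_bloc_simple_alt (input_3x3 : List (List Int)) : List (List Int) :=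
  (List.range 9).map (fun r => (List.range 9).map (fun c => (input_3x3.getD (r / 3) []).getD (c / 3) 0))

-- ===== PRECONDITION & SPEC =====
-- Pre_ excludes exactly the inputs on which the Python A raises IndexError: fewer than 3 rows,
-- or one of the first three rows shorter than 3 (B raises IndexError there too).
def Pre_appliquer_bloc_simple (input_3x3 : List (List Int)) : Prop :=
  3 ≤ input_3x3.length ∧ 3 ≤ (input_3x3.getD 0 []).length ∧
  3 ≤ (input_3x3.getD 1 []).length ∧ 3 ≤ (input_3x3.getD 2 []).length
instance (input_3x3 : List (List Int)) : Decidable (Pre_appliquer_bloc_simple input_3x3) := by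
  unfold Pre_appliquer_bloc_simple; infer_instance

def pvWitness_appliquer_bloc_simple : List (List Int) := [[0, 1, 2], [3, 0, 5], [6, 7, 0]]

def Spec_appliquer_bloc_simple (input_3x3 : List (List Int)) (out : List (List Int)) : Prop := out = appliquer_bloc_simple_alt input_3x3
instance (input_3x3 : List (List Int)) (out : List (List Int)) : Decidable (Spec_appliquer_bloc_simple input_3x3 out) := by unfold Spec_appliquer_bloc_simple; infer_instance

-- ===== CLAIM (what is proved, stated in full; the proofs are below) =====
def Claim_equal_appliquer_bloc_simple : Prop := ∀ (input_3x3 : List (List Int)), Dom_appliquer_bloc_simple input_3x3 → Pre_appliquer_bloc_simple input_3x3 → Spec_appliquer_bloc_simple input_3x3 (appliquer_bloc_simple input_3x3)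

-- ===== LEMMAS AND PROOFS =====

-- ===== VERDICT (by name: the statement is the Claim_ definition above) =====
set_option maxHeartbeats 1000000 in
theorem appliquer_bloc_simple_spec : Claim_equal_appliquer_bloc_simple := by
  intro input_3x3 _ hpre
  obtain ⟨h0, h1, h2, h3⟩ := hpre
  match input_3x3, h0 with
  | (a :: b :: c :: rest), _ =>
    match a, h1 with
    | (a0 :: a1 :: a2 :: ar), _ =>
      match b, h2 with
      | (b0 :: b1 :: b2 :: br), _ =>
        match c, h3 with
        | (c0 :: c1 :: c2 :: cr), _ =>
          show appliquer_bloc_simple _ = appliquer_bloc_simple_alt _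
          simp [appliquer_bloc_simple, appliquer_bloc_simple_alt,
            List.range_succ, List.getD, List.modify, List.set]
          repeat' apply And.intro
          -- each remaining goal reads one cell of A's pattern; the 0/non-0 branch is vacuous
          all_goals (split <;> rename_i h <;> simp [h])
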